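-- pv_equiv track=rewrite | github.com/grahama1970/extractor | src/extractor/core/arangodb/importers.py | determine_collection
-- ===== SOURCE A (Python) =====
-- DOCUMENT_COLLECTION = "documents"
--
-- BLOCK_COLLECTION = "blocks"
--
-- PAGE_COLLECTION = "pages"
--
-- SECTION_COLLECTION = "sections"
--
-- CONTENT_COLLECTION = "content_blocks"
--
-- def determine_collection(node_id: str) -> str:
--     """
--     Determine the collection for a node based on its ID prefix.
--
--     Args:
--         node_id: Node ID
--
--     Returns:
--         Collection name
--     """
--     if node_id.startswith("doc_") or node_id.startswith("document_"):
--         return DOCUMENT_COLLECTION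
--     elif node_id.startswith("page_"):
--         return PAGE_COLLECTION
--     elif node_id.startswith("section_header_"):
--         return SECTION_COLLECTION
--     elif any(node_id.startswith(prefix) for prefix in ["text_", "code_", "table_", "equation_", "image_"]):
--         return CONTENT_COLLECTION
--     else:
--         # Default to block collection for unknown types
--         return BLOCK_COLLECTION
-- ===== SOURCE B (Python) =====
-- COLLECTION_BY_TYPE = {
--     "doc": "documents",
--     "document": "documents",
--     "page": "pages",
--     "text": "content_blocks",
--     "code": "content_blocks",
--     "table": "content_blocks",
--     "equation": "content_blocks",
--     "image": "content_blocks",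
-- }
--
-- def determine_collection(node_id: str) -> str:
--     head, sep, rest = node_id.partition("_")
--     if not sep:
--         return "blocks"
--     if head == "section":
--         return "sections" if rest.startswith("header_") else "blocks"
--     return COLLECTION_BY_TYPE.get(head, "blocks")
-- ===== Notes on version B (the rewrite author's own statement) =====
-- stated objective: alternative
-- what changed: Instead of testing nine '_'-terminated prefixes in order, B splits the id once at its first underscore (str.partition) and dispatches the head token through a dict keyed by node type, with a sub-check for the two-token 'section_header_' case; correct because every prefix in A is a type token followed by '_'.
import Mathlib
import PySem

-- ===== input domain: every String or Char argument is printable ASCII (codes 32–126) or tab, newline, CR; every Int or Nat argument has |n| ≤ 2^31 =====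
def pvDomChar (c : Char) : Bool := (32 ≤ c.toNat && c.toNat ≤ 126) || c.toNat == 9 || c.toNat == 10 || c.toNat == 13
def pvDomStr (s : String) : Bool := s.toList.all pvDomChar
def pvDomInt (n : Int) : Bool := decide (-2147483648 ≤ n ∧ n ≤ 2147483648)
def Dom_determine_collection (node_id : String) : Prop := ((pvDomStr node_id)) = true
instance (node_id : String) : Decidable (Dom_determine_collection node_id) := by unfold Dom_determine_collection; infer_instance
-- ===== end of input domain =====

-- B splits the id once at its first '_' (Python str.partition) and dispatches the head token
-- through a dict keyed by node type, instead of A's ordered scan of '_'-terminated prefixes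
-- (objective: alternative decomposition, same cost).

-- ===== PORT A =====
def determine_collection (node_id : String) : String :=
  if PySem.Str.startswith node_id "doc_" || PySem.Str.startswith node_id "document_" then
    "documents"
  else if PySem.Str.startswith node_id "page_" then
    "pages"
  else if PySem.Str.startswith node_id "section_header_" then
    "sections"
  else if ["text_", "code_", "table_", "equation_", "image_"].any
      (fun pre => PySem.Str.startswith node_id pre) then
    "content_blocks"
  else
    "blocks"

-- ===== PORT B =====
-- node_id.partition("_") on code points: (head, found-separator?, rest); exact for the one-char separator '_'
def pvPartitionUnderscore (cs : List Char) : List Char × Bool × List Char :=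
  match cs with
  | [] => ([], false, [])
  | c :: rest =>
      if c = '_' then ([], true, rest)
      else
        let (h, s, r) := pvPartitionUnderscore rest
        (c :: h, s, r)

def collectionByType : PySem.Dict String String :=
  PySem.Dict.ofList
  [("doc", "documents"), ("document", "documents"), ("page", "pages"),
   ("text", "content_blocks"), ("code", "content_blocks"), ("table", "content_blocks"),
   ("equation", "content_blocks"), ("image", "content_blocks")]

def determine_collection_alt (node_id : String) : String :=
  let (head, sep, rest) := pvPartitionUnderscore node_id.toList
  if !sep then "blocks"
  else if String.ofList head = "section" then
    if PySem.Str.startswith (String.ofList rest) "header_" then "sections" else "blocks"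
  else PySem.Dict.getD collectionByType (String.ofList head) "blocks"

-- ===== PRECONDITION & SPEC =====
def Spec_determine_collection (node_id : String) (out : String) : Prop := out = determine_collection_alt node_id
instance (node_id : String) (out : String) : Decidable (Spec_determine_collection node_id out) := by unfold Spec_determine_collection; infer_instance

-- ===== CLAIM =====
def Claim_equal_determine_collection : Prop := ∀ (node_id : String), Dom_determine_collection node_id → Spec_determine_collection node_id (determine_collection node_id)

-- ===== LEMMAS AND PROOFS =====
theorem pvPartition_eq (cs : List Char) :
    pvPartitionUnderscore cs =
      (cs.takeWhile (· ≠ '_'), decide ('_' ∈ cs), (cs.dropWhile (· ≠ '_')).tail) := by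
  induction cs with
  | nil => simp [pvPartitionUnderscore]
  | cons c rest ih =>
      by_cases h : c = '_'
      · subst h; simp [pvPartitionUnderscore, List.takeWhile, List.dropWhile]
      · simp [pvPartitionUnderscore, ih, List.takeWhile, List.dropWhile, h, Ne.symm h]

theorem key_lemma (p q cs : List Char) (hp : '_' ∉ p) :
    (p ++ '_' :: q) <+: cs ↔
      (cs.takeWhile (· ≠ '_') = p ∧ '_' ∈ cs ∧ q <+: (cs.dropWhile (· ≠ '_')).tail) := by
  induction p generalizing cs with
  | nil =>
      cases cs with
      | nil => simp
      | cons c r =>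
          by_cases hc : c = '_'
          · subst hc
            simp [List.takeWhile, List.dropWhile, List.cons_prefix_cons]
          · simp [List.takeWhile, List.dropWhile, hc, List.cons_prefix_cons, Ne.symm hc]
  | cons a p' ih =>
      have ha : a ≠ '_' := fun h => hp (h ▸ List.mem_cons_self)
      have hp' : '_' ∉ p' := fun h => hp (List.mem_cons_of_mem _ h)
      cases cs with
      | nil => simp
      | cons c r =>
          by_cases hc : c = a
          · subst hc
            simp [List.takeWhile, List.dropWhile, ha, List.cons_prefix_cons, ih r hp', Ne.symm ha]
          · by_cases hcu : c = '_'
            · subst hcu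
              simp [List.takeWhile, List.dropWhile, List.cons_prefix_cons, Ne.symm hc]
            · simp [List.takeWhile, List.dropWhile, hcu, List.cons_prefix_cons, hc, Ne.symm hc]

theorem sw_split (node_id : String) (p q : List Char) (lit : String)
    (hl : lit.toList = p ++ '_' :: q) (hp : '_' ∉ p) :
    PySem.Str.startswith node_id lit =
      decide (node_id.toList.takeWhile (· ≠ '_') = p ∧ '_' ∈ node_id.toList ∧
        q <+: (node_id.toList.dropWhile (· ≠ '_')).tail) := by
  rw [PySem.Str.startswith_eq, hl]
  rcases h : PySem.Chars.startswith node_id.toList (p ++ '_' :: q) with _ | _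
  · symm; simp only [decide_eq_false_iff_not]
    rw [← key_lemma p q node_id.toList hp]
    intro hpre
    rw [← PySem.Chars.startswith_iff] at hpre
    simp [h] at hpre
  · symm; simp only [decide_eq_true_eq]
    rw [← key_lemma p q node_id.toList hp]
    exact (PySem.Chars.startswith_iff _ _).mp h

theorem ofList_eq_iff (t : List Char) (s : String) : String.ofList t = s ↔ t = s.toList := by
  constructor
  · intro h; rw [← h]; simp
  · intro h; rw [h]; simp

theorem sw_eq_decide (cs p : List Char) :
    PySem.Chars.startswith cs p = decide (p <+: cs) := by
  rcases h : PySem.Chars.startswith cs p with _ | _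
  · symm; simp only [decide_eq_false_iff_not]
    intro hp
    rw [← PySem.Chars.startswith_iff] at hp
    simp [h] at hp
  · symm; simp only [decide_eq_true_eq]
    rw [← PySem.Chars.startswith_iff]
    exact h

theorem ab_agree (node_id : String) :
    determine_collection node_id = determine_collection_alt node_id := by
  unfold determine_collection determine_collection_alt
  rw [pvPartition_eq]
  rw [sw_split node_id "doc".toList [] "doc_" (by decide) (by decide),
      sw_split node_id "document".toList [] "document_" (by decide) (by decide),
      sw_split node_id "page".toList [] "page_" (by decide) (by decide),
      sw_split node_id "section".toList "header_".toList "section_header_" (by decide) (by decide)]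
  simp only [List.any_cons, List.any_nil,
      sw_split node_id "text".toList [] "text_" (by decide) (by decide),
      sw_split node_id "code".toList [] "code_" (by decide) (by decide),
      sw_split node_id "table".toList [] "table_" (by decide) (by decide),
      sw_split node_id "equation".toList [] "equation_" (by decide) (by decide),
      sw_split node_id "image".toList [] "image_" (by decide) (by decide)]
  set t := node_id.toList.takeWhile (· ≠ '_') with ht
  set r := (node_id.toList.dropWhile (· ≠ '_')).tail with hr
  by_cases hm : '_' ∈ node_id.toList
  · simp only [hm, true_and, and_true, List.nil_prefix, decide_true, Bool.not_true,
      Bool.false_eq_true, if_false, decide_eq_true_eq]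
    by_cases h1 : t = "doc".toList
    · simp [h1]
      decide
    by_cases h2 : t = "document".toList
    · simp [h2]
      decide
    by_cases h3 : t = "page".toList
    · simp [h3]
      decide
    by_cases h4 : t = "section".toList
    · simp only [h4, PySem.Str.startswith_eq, sw_eq_decide, String.toList_ofList]
      simp
    by_cases h5 : t = "text".toList
    · simp [h5]
      decide
    by_cases h6 : t = "code".toList
    · simp [h6]
      decide
    by_cases h7 : t = "table".toList
    · simp [h7]
      decide
    by_cases h8 : t = "equation".toList
    · simp [h8]
      decide
    by_cases h9 : t = "image".toList
    · simp [h9]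
      decide
    · have hu : ∀ s : String, t ≠ s.toList → ¬ s = String.ofList t := by
        intro s hts h; exact hts (by rw [h]; simp)
      have hC : collectionByType = PySem.Dict.mk
          [("doc", "documents"), ("document", "documents"), ("page", "pages"),
           ("text", "content_blocks"), ("code", "content_blocks"), ("table", "content_blocks"),
           ("equation", "content_blocks"), ("image", "content_blocks")] := by decide
      have h1' : ¬ t = ['d','o','c'] := h1
      have h2' : ¬ t = ['d','o','c','u','m','e','n','t'] := h2
      have h3' : ¬ t = ['p','a','g','e'] := h3
      have h4' : ¬ t = ['s','e','c','t','i','o','n'] := h4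
      have h5' : ¬ t = ['t','e','x','t'] := h5
      have h6' : ¬ t = ['c','o','d','e'] := h6
      have h7' : ¬ t = ['t','a','b','l','e'] := h7
      have h8' : ¬ t = ['e','q','u','a','t','i','o','n'] := h8
      have h9' : ¬ t = ['i','m','a','g','e'] := h9
      have hE : ∀ x : String, (PySem.Dict.mk ([] : List (String × String))).get? x = none :=
        fun _ => rfl
      simp [hE, hC, ofList_eq_iff, PySem.Dict.getD, PySem.Dict.get?_mk_cons, beq_iff_eq,
        h1', h2', h3', h4', h5', h6', h7', h8', h9',
        hu _ h1, hu _ h2, hu _ h3, hu _ h5, hu _ h6, hu _ h7, hu _ h8, hu _ h9]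
  · simp [hm]

-- ===== VERDICT =====
theorem determine_collection_spec : Claim_equal_determine_collection := by
  intro node_id _
  exact ab_agree node_id
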